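-- pv_equiv track=rewrite | github.com/CanineSatsuma6/AdventOfCode | Python/2023/10/2.py | countInteriorCells
-- ===== SOURCE A (Python) =====
-- def countInteriorCells(grid):
--     numInterior = 0
--
--     for row in grid:
--         inside = False
--         for char in row:
--             if char == '|':
--                 inside = not inside
--             elif inside:
--                 numInterior += 1
--
--     return numInterior
-- ===== SOURCE B (Python) =====
-- def countInteriorCells(grid):
--     total = 0
--     for row in grid:
--         for i, part in enumerate(row.split('|')):
--             if i % 2 == 1:
--                 total += len(part)
--     return total
-- ===== Notes on version B (the rewrite author's own statement) =====
-- stated objective: alternative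
-- what changed: Replaces the per-character inside/toggle flag with splitting each row on '|' and summing the lengths of the odd-indexed segments.
import Mathlib
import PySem

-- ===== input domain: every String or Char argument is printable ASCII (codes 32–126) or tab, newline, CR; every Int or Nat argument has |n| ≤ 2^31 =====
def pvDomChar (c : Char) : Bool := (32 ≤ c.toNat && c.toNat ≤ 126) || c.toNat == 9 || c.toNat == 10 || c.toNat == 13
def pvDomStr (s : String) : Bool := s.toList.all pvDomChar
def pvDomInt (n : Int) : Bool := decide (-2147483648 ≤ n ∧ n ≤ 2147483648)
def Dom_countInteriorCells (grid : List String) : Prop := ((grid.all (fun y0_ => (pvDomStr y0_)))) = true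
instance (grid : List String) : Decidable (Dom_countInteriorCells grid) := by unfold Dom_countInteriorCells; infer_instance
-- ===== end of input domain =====

-- B replaces A's per-character inside/toggle flag by splitting each row on '|' and
-- summing the lengths of the odd-indexed segments (alternative algorithm, same cost).

-- ===== PORT A =====
def countInteriorCells (grid : List String) : Int :=
  grid.foldl (fun numInterior row =>
    (row.toList.foldl (fun (st : Bool × Int) char =>
        if char = '|' then (!st.1, st.2)
        else if st.1 then (st.1, st.2 + 1) else st)
      (false, numInterior)).2) 0

-- ===== PORT B =====
def countInteriorCells_alt (grid : List String) : Int :=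
  grid.foldl (fun total row =>
    (PySem.List.enumerate (PySem.Chars.splitOn row.toList ['|'])).foldl
      (fun total p => if p.1 % 2 == 1 then total + (p.2.length : Int) else total) total) 0

-- ===== PRECONDITION & SPEC =====
def Spec_countInteriorCells (grid : List String) (out : Int) : Prop := out = countInteriorCells_alt grid
instance (grid : List String) (out : Int) : Decidable (Spec_countInteriorCells grid out) := by unfold Spec_countInteriorCells; infer_instance

-- ===== CLAIM (what is proved, stated in full; the proofs are below) =====
def Claim_equal_countInteriorCells : Prop := ∀ (grid : List String), Dom_countInteriorCells grid → Spec_countInteriorCells grid (countInteriorCells grid)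

-- ===== LEMMAS AND PROOFS =====

-- A's inner loop as a pure count: number of non-'|' chars seen while the flag is set.
def pvCnt : List Char → Bool → Int
  | [], _ => 0
  | c :: cs, b => if c = '|' then pvCnt cs (!b) else (if b then 1 else 0) + pvCnt cs b

-- prepend a part to the first segment of a split
def pvConsHead (c : Char) : List (List Char) → List (List Char)
  | [] => [[c]]
  | q :: qs => (c :: q) :: qs

-- simple structural specification of splitting on '|'
def pvSplit : List Char → List (List Char)
  | [] => [[]]
  | c :: cs => if c = '|' then [] :: pvSplit cs else pvConsHead c (pvSplit cs)

-- alternating sum of segment lengths; b = true means the head segment is counted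
def pvSumAlt : Bool → List (List Char) → Int
  | _, [] => 0
  | b, p :: ps => (if b then (p.length : Int) else 0) + pvSumAlt (!b) ps

def pvPrepend (p : List Char) : List (List Char) → List (List Char)
  | [] => [p]
  | q :: qs => (p ++ q) :: qs

theorem pvSplit_ne_nil (cs : List Char) : pvSplit cs ≠ [] := by
  cases cs with
  | nil => simp [pvSplit]
  | cons c cs =>
    simp only [pvSplit]
    split
    · simp
    · cases h : pvSplit cs <;> simp [pvConsHead]

theorem pvCnt_eq_sumAlt (cs : List Char) (b : Bool) :
    pvCnt cs b = pvSumAlt b (pvSplit cs) := by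
  induction cs generalizing b with
  | nil => cases b <;> simp [pvCnt, pvSplit, pvSumAlt]
  | cons c cs ih =>
    by_cases hc : c = '|'
    · simp [pvCnt, pvSplit, hc, pvSumAlt, ih]
    · cases h : pvSplit cs with
      | nil => exact absurd h (pvSplit_ne_nil cs)
      | cons q qs =>
        have := ih b
        rw [h] at this
        cases b <;>
          simp [pvCnt, pvSplit, hc, pvConsHead, pvSumAlt, this, h] <;> try ring

theorem pvGo_eq (l : List Char) :
    ∀ (fuel : Nat) (cur : List Char) (acc : List (List Char)), l.length ≤ fuel →
      PySem.Chars.splitOn.go ['|'] fuel l cur acc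
        = acc.reverse ++ pvPrepend cur.reverse (pvSplit l) := by
  induction l with
  | nil =>
    intro fuel cur acc _
    cases fuel <;> simp [PySem.Chars.splitOn.go, pvSplit, pvPrepend]
  | cons c rest ih =>
    intro fuel cur acc hf
    cases fuel with
    | zero => simp at hf
    | succ f =>
      by_cases hc : c = '|'
      · have hpre : List.isPrefixOf ['|'] (c :: rest) = true := by
          simp [List.isPrefixOf, hc]
        rw [PySem.Chars.splitOn.go, if_pos hpre]
        simp only [List.length_cons] at hf
        simp only [List.length_singleton, List.drop_succ_cons, List.drop_zero]
        rw [ih f [] (cur.reverse :: acc) (by omega)]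
        cases hs : pvSplit rest with
        | nil => exact absurd hs (pvSplit_ne_nil rest)
        | cons q qs => simp [pvSplit, hc, hs, pvPrepend]
      · have hpre : List.isPrefixOf ['|'] (c :: rest) = false := by
          simp [List.isPrefixOf]
          exact fun h => absurd h.symm hc
        rw [PySem.Chars.splitOn.go, if_neg (by simp [hpre])]
        simp only [List.length_cons] at hf
        rw [ih f (c :: cur) acc (by omega)]
        cases h : pvSplit rest with
        | nil => exact absurd h (pvSplit_ne_nil rest)
        | cons q qs => simp [pvSplit, hc, h, pvPrepend, pvConsHead]

theorem pvSplitOn_eq (cs : List Char) : PySem.Chars.splitOn cs ['|'] = pvSplit cs := by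
  rw [PySem.Chars.splitOn, pvGo_eq cs (cs.length + 1) [] [] (by omega)]
  cases h : pvSplit cs with
  | nil => exact absurd h (pvSplit_ne_nil cs)
  | cons q qs => simp [pvPrepend]

theorem pvEnumFold_eq (parts : List (List Char)) :
    ∀ (i t : Int), 0 ≤ i →
      (PySem.List.enumerate parts i).foldl
          (fun total p => if p.1 % 2 == 1 then total + (p.2.length : Int) else total) t
        = t + pvSumAlt (i % 2 == 1) parts := by
  induction parts with
  | nil => intro i t _; simp [PySem.List.enumerate, pvSumAlt]
  | cons p ps ih =>
    intro i t hi
    have h2 : i % 2 = 0 ∨ i % 2 = 1 := Int.emod_two_eq_zero_or_one i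
    rw [PySem.List.enumerate, List.foldl_cons, ih (i + 1) _ (by omega)]
    rcases h2 with h | h
    · have h1 : (i + 1) % 2 = 1 := by omega
      simp [h, h1, pvSumAlt]
      try ring
    · have h1 : (i + 1) % 2 = 0 := by omega
      simp [h, h1, pvSumAlt]
      try ring

theorem pvInnerA_eq (cs : List Char) :
    ∀ (b : Bool) (n : Int),
      (cs.foldl (fun (st : Bool × Int) char =>
          if char = '|' then (!st.1, st.2)
          else if st.1 then (st.1, st.2 + 1) else st) (b, n)).2
        = n + pvCnt cs b := by
  induction cs with
  | nil => intro b n; simp [pvCnt]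
  | cons c cs ih =>
    intro b n
    by_cases hc : c = '|'
    · simp [hc, pvCnt, ih]
    · cases b <;> simp [hc, pvCnt, ih] <;> ring

theorem pvBoth_eq (grid : List String) :
    ∀ (a : Int),
      grid.foldl (fun numInterior row =>
        (row.toList.foldl (fun (st : Bool × Int) char =>
            if char = '|' then (!st.1, st.2)
            else if st.1 then (st.1, st.2 + 1) else st)
          (false, numInterior)).2) a
      = grid.foldl (fun total row =>
          (PySem.List.enumerate (PySem.Chars.splitOn row.toList ['|'])).foldl
            (fun total p => if p.1 % 2 == 1 then total + (p.2.length : Int) else total) total) a := by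
  induction grid with
  | nil => intro a; simp
  | cons row rows ih =>
    intro a
    simp only [List.foldl_cons]
    rw [pvInnerA_eq, pvSplitOn_eq, pvEnumFold_eq _ 0 a (by omega), pvCnt_eq_sumAlt]
    exact ih _

-- ===== VERDICT (by name: the statement is the Claim_ definition above) =====
theorem countInteriorCells_spec : Claim_equal_countInteriorCells := by
  intro grid _
  unfold Spec_countInteriorCells countInteriorCells countInteriorCells_alt
  exact pvBoth_eq grid 0
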